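-- pv_equiv track=rewrite | github.com/akhandsingh17/assignments | leetcode/LeetCode216.py | LeetCode216
-- ===== SOURCE A (Python) =====
-- import collections
--
-- def LeetCode216(ary,k,n):
--
--     dict=collections.Counter(ary)
--
--     lst=[]
--     cnt=[]
--
--     for key,val in dict.items():
--         lst.append(key)
--         cnt.append(val)
--
--     fnl_lst=[]
--     tmp=[]
--
--     Combinations_recur(lst,fnl_lst,tmp,k,n)
--
--     return fnl_lst
--
-- def Combinations_recur(lst,fnl_lst,tmp,k,n):
--
--
--     if len(tmp)==k:
--         sum=0
--         for l in tmp: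
--             sum=sum+l
--         if sum==n:
--             if sorted(tmp) not in fnl_lst:
--                 fnl_lst.append(sorted(tmp.copy()))
--
--     for i in range(0,len(lst)):
--         tmp.append(lst[i])
--         Combinations_recur(lst[i+1:], fnl_lst, tmp, k, n)
--         tmp.pop()
-- ===== SOURCE B (Python) =====
-- def LeetCode216(ary, k, n):
--     # choose-k DFS with a running count/sum instead of enumerating every subset
--     # and post-filtering by length, sum and a dedup scan
--     lst = list(dict.fromkeys(ary))
--     out = []
--
--     def go(rest, need, rem, acc):
--         if need == 0:
--             if rem == 0:
--                 out.append(sorted(acc))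
--             return
--         if need < 0 or len(rest) < need:
--             return
--         go(rest[1:], need - 1, rem - rest[0], acc + [rest[0]])
--         go(rest[1:], need, rem, acc)
--
--     go(lst, k, n, [])
--     return out
-- ===== Notes on version B (the rewrite author's own statement) =====
-- stated objective: alternative
-- what changed: B replaces A's enumeration of ALL subsets of the deduplicated values (post-filtered by length and sum, with a quadratic 'sorted(tmp) not in fnl_lst' dedup scan) by a choose-k include/exclude DFS carrying a running remaining-count and remaining-sum, pruning branches too short to reach size k and dropping the dedup scan (provably redundant on distinct values); still exponential when k is near m/2, so no overall speed claim.
import Mathlib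
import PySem

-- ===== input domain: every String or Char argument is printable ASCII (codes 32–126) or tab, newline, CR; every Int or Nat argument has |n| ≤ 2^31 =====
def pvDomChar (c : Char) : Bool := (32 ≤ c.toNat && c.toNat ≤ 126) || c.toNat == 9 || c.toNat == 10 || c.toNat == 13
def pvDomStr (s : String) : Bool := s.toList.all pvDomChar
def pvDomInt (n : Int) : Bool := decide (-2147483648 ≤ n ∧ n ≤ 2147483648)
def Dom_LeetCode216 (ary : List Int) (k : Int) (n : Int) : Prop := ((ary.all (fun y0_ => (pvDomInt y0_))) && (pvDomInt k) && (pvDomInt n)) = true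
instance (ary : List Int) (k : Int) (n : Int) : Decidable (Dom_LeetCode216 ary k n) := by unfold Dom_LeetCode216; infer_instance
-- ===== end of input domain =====

-- B replaces A's all-subsets enumeration + length/sum post-filter + dedup scan by a
-- choose-k DFS with a running count/sum and size pruning (an alternative algorithm).

-- ===== PORT A =====
-- Combinations_recur(lst, fnl_lst, tmp, k, n): the body first (maybe) appends to fnl_lst,
-- then loops `for i in range(len(lst))` recursing on lst[i+1:]; the loop over successive
-- tails is combLoopA, the mutated fnl_lst is threaded as an accumulator (tmp's append/pop
-- cancel, so tmp is passed unchanged to the loop).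
mutual
def combRecA (lst : List Int) (fnl : List (List Int)) (tmp : List Int) (k n : Int) :
    List (List Int) :=
  let fnl' :=
    if ((tmp.length : Int) = k) then
      let s := tmp.foldl (fun s l => s + l) 0
      if s = n then
        if (PySem.List.sorted tmp (fun x => x) false) ∈ fnl then fnl
        else fnl ++ [PySem.List.sorted tmp (fun x => x) false]
      else fnl
    else fnl
  combLoopA lst fnl' tmp k n
termination_by (lst.length, 1)
decreasing_by all_goals omega
def combLoopA (lst : List Int) (fnl : List (List Int)) (tmp : List Int) (k n : Int) :
    List (List Int) :=
  match lst with
  | [] => fnl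
  | x :: rest => combLoopA rest (combRecA rest fnl (tmp ++ [x]) k n) tmp k n
termination_by (lst.length, 0)
decreasing_by all_goals simp_wf; omega
end

def LeetCode216 (ary : List Int) (k : Int) (n : Int) : List (List Int) :=
  let d := PySem.Dict.counter ary
  let p := d.items.foldl
    (fun (acc : List Int × List Int) kv => (acc.1 ++ [kv.1], acc.2 ++ [kv.2])) ([], [])
  let lst := p.1
  combRecA lst [] [] k n

-- ===== PORT B =====
def altGo (rest : List Int) (need rem : Int) (acc : List Int) (out : List (List Int)) :
    List (List Int) :=
  if need = 0 then
    (if rem = 0 then out ++ [PySem.List.sorted acc (fun x => x) false] else out)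
  else if need < 0 ∨ ((rest.length : Int) < need) then out
  else
    match rest with
    | [] => out
    | x :: rs => altGo rs need rem acc (altGo rs (need - 1) (rem - x) (acc ++ [x]) out)
termination_by rest.length

def LeetCode216_alt (ary : List Int) (k : Int) (n : Int) : List (List Int) :=
  altGo (PySem.List.dedup ary) k n [] []

-- ===== PRECONDITION & SPEC =====
def Spec_LeetCode216 (ary : List Int) (k : Int) (n : Int) (out : List (List Int)) : Prop := out = LeetCode216_alt ary k n
instance (ary : List Int) (k : Int) (n : Int) (out : List (List Int)) : Decidable (Spec_LeetCode216 ary k n out) := by unfold Spec_LeetCode216; infer_instance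

-- ===== CLAIM (what is proved, stated in full; the proofs are below) =====
def Claim_equal_LeetCode216 : Prop := ∀ (ary : List Int) (k : Int) (n : Int), Dom_LeetCode216 ary k n → Spec_LeetCode216 ary k n (LeetCode216 ary k n)

-- ===== LEMMAS AND PROOFS =====

-- all subsequences of lst in A's DFS emission order (subsT lst: the nonempty ones)
def subsT : List Int → List (List Int)
  | [] => []
  | x :: xs => (([] :: subsT xs).map (x :: ·)) ++ subsT xs

def subsA (lst : List Int) : List (List Int) := [] :: subsT lst

-- emission of a completed tuple t = tmp ++ c: sorted(t) if len(t)==k and sum(t)==n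
def emit1 (k n : Int) (tmp c : List Int) : Option (List Int) :=
  if ((tmp ++ c).length : Int) = k ∧ (tmp ++ c).sum = n then
    some (PySem.List.sorted (tmp ++ c) (fun x => x) false)
  else none

-- A's `if sorted(tmp) not in fnl_lst: fnl_lst.append(...)` accumulation over a list of emissions
def dedupFold (fnl : List (List Int)) (es : List (List Int)) : List (List Int) :=
  es.foldl (fun acc s => if s ∈ acc then acc else acc ++ [s]) fnl

theorem subsT_ne_nil : ∀ (lst : List Int), ∀ c ∈ subsT lst, c ≠ [] := by
  intro lst
  induction lst with
  | nil => simp [subsT]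
  | cons x xs ih =>
    intro c hc
    simp only [subsT, List.mem_append, List.mem_map] at hc
    rcases hc with ⟨a, _, rfl⟩ | hc
    · simp
    · exact ih c hc

theorem subsT_sublist : ∀ (lst : List Int), ∀ c ∈ subsT lst, c.Sublist lst := by
  intro lst
  induction lst with
  | nil => simp [subsT]
  | cons x xs ih =>
    intro c hc
    simp only [subsT, List.mem_append, List.mem_map, List.mem_cons] at hc
    rcases hc with ⟨a, ha | ha, rfl⟩ | hc
    · subst ha; simp
    · exact (ih a ha).cons₂ x
    · exact (ih c hc).cons x

theorem subsA_sublist (lst : List Int) : ∀ c ∈ subsA lst, c.Sublist lst := by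
  intro c hc
  rcases List.mem_cons.mp hc with rfl | hc
  · exact List.nil_sublist lst
  · exact subsT_sublist lst c hc

theorem nodup_subsT : ∀ (lst : List Int), lst.Nodup → (subsT lst).Nodup := by
  intro lst
  induction lst with
  | nil => simp [subsT]
  | cons x xs ih =>
    intro h
    rcases List.nodup_cons.mp h with ⟨hx, hxs⟩
    simp only [subsT]
    apply List.Nodup.append
    · refine List.Nodup.map (fun a b hab => by simpa using hab) ?_
      exact List.nodup_cons.mpr ⟨fun hmem => subsT_ne_nil xs [] hmem rfl, ih hxs⟩
    · exact ih hxs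
    · intro c hc hc'
      simp only [List.mem_map, List.mem_cons] at hc
      rcases hc with ⟨a, _, rfl⟩
      have : x ∈ xs := (subsT_sublist xs _ hc').subset (by simp)
      exact hx this

theorem nodup_subsA (lst : List Int) (h : lst.Nodup) : (subsA lst).Nodup := by
  refine List.nodup_cons.mpr ⟨?_, nodup_subsT lst h⟩
  intro hmem
  exact subsT_ne_nil lst [] hmem rfl

-- two permuted sublists of a duplicate-free list are equal
theorem sublist_perm_eq {α : Type} : ∀ (l s t : List α), l.Nodup → s.Sublist l → t.Sublist l →
    s.Perm t → s = t := by
  intro l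
  induction l with
  | nil => intro s t _ hs ht _; simp [List.sublist_nil.mp hs, List.sublist_nil.mp ht]
  | cons a l ih =>
    intro s t hnd hs ht hp
    rcases List.nodup_cons.mp hnd with ⟨ha, hl⟩
    rcases List.sublist_cons_iff.mp hs with hs' | ⟨s', rfl, hs'⟩
    · rcases List.sublist_cons_iff.mp ht with ht' | ⟨t', rfl, ht'⟩
      · exact ih s t hl hs' ht' hp
      · exfalso
        have : a ∈ s := hp.symm.subset (by simp)
        exact ha (hs'.subset this)
    · rcases List.sublist_cons_iff.mp ht with ht' | ⟨t', rfl, ht'⟩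
      · exfalso
        have : a ∈ t := hp.subset (by simp)
        exact ha ((List.Sublist.subset ht') this)
      · have := ih s' t' hl hs' ht' (List.Perm.cons_inv hp)
        rw [this]

-- distinct sublists of a duplicate-free list yield distinct emissions
theorem emit1_some (k n : Int) (c y : List Int) (h : emit1 k n [] c = some y) :
    y = PySem.List.sorted c (fun x => x) false := by
  simp only [emit1, List.nil_append] at h
  split at h
  · exact (Option.some.injEq _ _ ▸ h).symm
  · exact absurd h (by simp)

theorem nodup_filterMap_of_pairwise {α β : Type} (f : α → Option β) :
    ∀ (l : List α), l.Pairwise (fun a b => ∀ y, f a = some y → f b ≠ some y) →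
    (l.filterMap f).Nodup := by
  intro l
  induction l with
  | nil => simp
  | cons a l ih =>
    intro hp
    rcases List.pairwise_cons.mp hp with ⟨hhead, htail⟩
    rw [List.filterMap_cons]
    cases hfa : f a with
    | none => exact ih htail
    | some y =>
      refine List.nodup_cons.mpr ⟨?_, ih htail⟩
      intro hy
      rcases List.mem_filterMap.mp hy with ⟨b, hb, hfb⟩
      exact hhead b hb y hfa hfb

theorem nodup_emits (lst : List Int) (h : lst.Nodup) (k n : Int) :
    ((subsA lst).filterMap (emit1 k n [])).Nodup := by
  apply nodup_filterMap_of_pairwise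
  have hnd : (subsA lst).Pairwise (fun c c' => c ∈ subsA lst ∧ c' ∈ subsA lst ∧ c ≠ c') :=
    List.Pairwise.and_mem.mp (nodup_subsA lst h)
  refine hnd.imp ?_
  rintro c c' ⟨hc, hc', hne⟩ y hy hy'
  have h1 := emit1_some k n c y hy
  have h2 := emit1_some k n c' y hy'
  have hperm : c.Perm c' :=
    (PySem.List.sorted_id_eq_sorted_id_iff_perm c c').mp (by rw [← h1, ← h2])
  exact hne (sublist_perm_eq lst c c' h (subsA_sublist lst c hc) (subsA_sublist lst c' hc') hperm)

theorem dedupFold_eq_append : ∀ (es fnl : List (List Int)),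
    es.Nodup → (∀ e ∈ es, e ∉ fnl) → dedupFold fnl es = fnl ++ es := by
  intro es
  induction es with
  | nil => intro fnl _ _; simp [dedupFold]
  | cons e es ih =>
    intro fnl hnd hdisj
    rcases List.nodup_cons.mp hnd with ⟨he, hes⟩
    have h1 : e ∉ fnl := hdisj e (by simp)
    simp only [dedupFold, List.foldl_cons, if_neg h1]
    rw [show (fnl ++ [e]) = fnl ++ [e] from rfl]
    have := ih (fnl ++ [e]) hes (by
      intro x hx
      simp only [List.mem_append, List.mem_singleton]
      rintro (h | rfl)
      · exact hdisj x (by simp [hx]) h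
      · exact he hx)
    simpa [dedupFold, List.append_assoc] using this


theorem dedupFold_append (fnl : List (List Int)) (a b : List (List Int)) :
    dedupFold fnl (a ++ b) = dedupFold (dedupFold fnl a) b := by
  simp [dedupFold, List.foldl_append]

-- B's emission function
def emitB (need rem : Int) (acc : List Int) (c : List Int) : Option (List Int) :=
  if ((c.length : Int) = need ∧ c.sum = rem) then
    some (PySem.List.sorted (acc ++ c) (fun x => x) false)
  else none

theorem altGo_char : ∀ (rest : List Int) (need rem : Int) (acc : List Int) (out : List (List Int)),
    altGo rest need rem acc out = out ++ (subsA rest).filterMap (emitB need rem acc) := by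
  intro rest
  induction rest with
  | nil =>
    intro need rem acc out
    rw [altGo]
    by_cases hn : need = 0
    · by_cases hr : rem = 0
      · simp only [subsA, subsT, List.filterMap_cons, List.filterMap_nil, emitB]
        simp [hn, hr]
      · simp only [subsA, subsT, List.filterMap_cons, List.filterMap_nil, emitB]
        simp [hn, hr, eq_comm]
    · have hg : need < 0 ∨ ((([] : List Int).length : Int) < need) := by
        simp only [List.length_nil, Int.natCast_zero]; omega
      rw [if_neg hn, if_pos hg]
      simp only [subsA, subsT, List.filterMap_cons, List.filterMap_nil, emitB]
      rw [if_neg (by simp; omega)]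
      simp
  | cons x rs ih =>
    intro need rem acc out
    rw [altGo]
    by_cases hn : need = 0
    · have hT : (subsT (x :: rs)).filterMap (emitB need rem acc) = [] := by
        rw [List.filterMap_eq_nil_iff]
        intro c hc
        have hne := subsT_ne_nil (x :: rs) c hc
        have : c.length ≠ 0 := fun h => hne (List.length_eq_zero_iff.mp h)
        simp only [emitB, hn]
        rw [if_neg]
        rintro ⟨h1, -⟩
        omega
      rw [show subsA (x :: rs) = [] :: subsT (x :: rs) from rfl, List.filterMap_cons]
      by_cases hr : rem = 0
      · have he : emitB need rem acc [] = some (PySem.List.sorted acc (fun x => x) false) := by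
          simp [emitB, hn, hr]
        rw [he, hT]
        simp [hn, hr]
      · have he : emitB need rem acc [] = none := by
          simp only [emitB]
          rw [if_neg]; rintro ⟨-, h2⟩; simp at h2; omega
        rw [he, hT]
        simp [hn, hr]
    · by_cases hg : need < 0 ∨ (((x :: rs).length : Int) < need)
      · have hall : ((subsA (x :: rs)).filterMap (emitB need rem acc)) = [] := by
          rw [List.filterMap_eq_nil_iff]
          intro c hc
          have hlen : c.length ≤ (x :: rs).length := (subsA_sublist _ c hc).length_le
          simp only [emitB]
          rw [if_neg]
          rintro ⟨h1, -⟩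
          rcases hg with hg | hg
          · omega
          · have : (c.length : Int) ≤ ((x :: rs).length : Int) := by exact_mod_cast hlen
            omega
        simp only [if_neg hn, if_pos hg, hall, List.append_nil]
      · simp only [if_neg hn, if_neg hg]
        rw [ih (need - 1) (rem - x) (acc ++ [x]) out, ih need rem acc]
        have hsplit : subsA (x :: rs) = [] :: ((subsA rs).map (x :: ·) ++ subsT rs) := rfl
        rw [hsplit]
        rw [List.filterMap_cons]
        have h0 : emitB need rem acc [] = none := by
          simp only [emitB]
          rw [if_neg]; rintro ⟨h1, -⟩; simp at h1; omega
        rw [h0, List.filterMap_append, List.filterMap_map]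
        have hF1 : (subsA rs).filterMap ((emitB need rem acc) ∘ (x :: ·)) =
            (subsA rs).filterMap (emitB (need - 1) (rem - x) (acc ++ [x])) := by
          apply List.filterMap_congr
          intro c _
          simp only [Function.comp_apply, emitB, List.length_cons, List.sum_cons]
          have hval : acc ++ x :: c = (acc ++ [x]) ++ c := by simp
          by_cases h1 : ((c.length : Int) = need - 1 ∧ c.sum = rem - x)
          · rw [if_pos (by push_cast; omega), if_pos h1, hval]
          · rw [if_neg (by push_cast; omega), if_neg h1]
        have hF2 : (subsT rs).filterMap (emitB need rem acc) =
            (subsA rs).filterMap (emitB need rem acc) := by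
          have : subsA rs = [] :: subsT rs := rfl
          rw [this, List.filterMap_cons, h0]
        rw [hF1, hF2, List.append_assoc]


theorem fnl'_eq (fnl : List (List Int)) (tmp : List Int) (k n : Int) :
    (if ((tmp.length : Int) = k) then
        let s := tmp.foldl (fun s l => s + l) 0
        if s = n then
          if (PySem.List.sorted tmp (fun x => x) false) ∈ fnl then fnl
          else fnl ++ [PySem.List.sorted tmp (fun x => x) false]
        else fnl
      else fnl)
      = dedupFold fnl ((emit1 k n tmp []).toList) := by
  have hsum : tmp.foldl (fun s l => s + l) 0 = tmp.sum := by
    rw [List.sum_eq_foldl]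
  by_cases h1 : ((tmp.length : Int) = k)
  · by_cases h2 : tmp.sum = n
    · simp [emit1, h1, h2, hsum, dedupFold]
    · simp [emit1, h1, h2, hsum, dedupFold]
  · simp [emit1, h1, dedupFold]

theorem rec_from_loop (lst tmp : List Int) (k n : Int)
    (hloop : ∀ fnl, combLoopA lst fnl tmp k n =
      dedupFold fnl ((subsT lst).filterMap (emit1 k n tmp))) :
    ∀ fnl, combRecA lst fnl tmp k n =
      dedupFold fnl ((subsA lst).filterMap (emit1 k n tmp)) := by
  intro fnl
  simp only [combRecA]
  rw [hloop, fnl'_eq]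
  have hsplit : (subsA lst).filterMap (emit1 k n tmp) =
      (emit1 k n tmp []).toList ++ (subsT lst).filterMap (emit1 k n tmp) := by
    rw [show subsA lst = [] :: subsT lst from rfl, List.filterMap_cons]
    cases h : emit1 k n tmp []
    · simp
    · simp
  rw [hsplit, dedupFold_append]

theorem loop_char : ∀ (m : Nat) (lst : List Int), lst.length ≤ m →
    ∀ (tmp : List Int) (k n : Int) (fnl : List (List Int)),
    combLoopA lst fnl tmp k n = dedupFold fnl ((subsT lst).filterMap (emit1 k n tmp)) := by
  intro m
  induction m with
  | zero =>
    intro lst hlen tmp k n fnl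
    have : lst = [] := List.length_eq_zero_iff.mp (Nat.le_zero.mp hlen)
    subst this
    simp [combLoopA, subsT, dedupFold]
  | succ m ih =>
    intro lst hlen tmp k n fnl
    cases lst with
    | nil => rw [combLoopA]; simp [subsT, dedupFold]
    | cons x rest =>
      have hrest : rest.length ≤ m := by simp at hlen; omega
      rw [combLoopA, ih rest hrest tmp k n,
          rec_from_loop rest (tmp ++ [x]) k n (ih rest hrest (tmp ++ [x]) k n) fnl]
      rw [show subsT (x :: rest) = (subsA rest).map (x :: ·) ++ subsT rest from rfl,
          List.filterMap_append, List.filterMap_map, dedupFold_append]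
      congr 2
      apply List.filterMap_congr
      intro c _
      have h : tmp ++ (x :: c) = (tmp ++ [x]) ++ c := by simp
      simp only [Function.comp_apply, emit1, h]

theorem rec_char (lst tmp : List Int) (k n : Int) (fnl : List (List Int)) :
    combRecA lst fnl tmp k n = dedupFold fnl ((subsA lst).filterMap (emit1 k n tmp)) :=
  rec_from_loop lst tmp k n (loop_char lst.length lst le_rfl tmp k n) fnl

-- ===== VERDICT (by name: the statement is the Claim_ definition above) =====
theorem LeetCode216_spec : Claim_equal_LeetCode216 := by
  intro ary k n _
  show LeetCode216 ary k n = LeetCode216_alt ary k n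
  have hA : LeetCode216 ary k n = combRecA (PySem.Set.ofList ary) [] [] k n := by
    simp only [LeetCode216]
    rw [PySem.Dict.items_counter]
    rw [PySem.List.foldl_prod_mk (f := fun (acc : List Int) (kv : Int × Int) => acc ++ [kv.1])
        (g := fun (acc : List Int) (kv : Int × Int) => acc ++ [kv.2])]
    rw [PySem.List.foldl_append_singleton_eq_map (f := fun (kv : Int × Int) => kv.1)]
    simp [List.map_map, Function.comp_def]
  rw [hA, rec_char,
      dedupFold_eq_append _ _ (nodup_emits _ (PySem.Set.nodup_ofList ary) k n) (by simp)]
  simp only [LeetCode216_alt, PySem.List.dedup_eq_ofList]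
  rw [altGo_char]
  simp only [List.nil_append]
  apply List.filterMap_congr
  intro c _
  simp [emit1, emitB]
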